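-- pv_equiv track=rewrite | github.com/GDSC-Hanyang/Algorithm-1- | 홍재희/codes/16.py | countDivisor
-- ===== SOURCE A (Python) =====
-- def countDivisor(n):
--     if n == 1:
--         return False
--     account = 2
--     for i in range(2, n):
--         if n % i == 0:
--             account += 1
--     return account % 2 == 0
-- ===== SOURCE B (Python) =====
-- def countDivisor(n):
--     if n == 1:
--         return False
--     cnt = 2
--     i = 2
--     while i * i <= n:
--         if n % i == 0:
--             cnt += 1 if i * i == n else 2
--         i += 1
--     return cnt % 2 == 0
-- ===== Notes on version B (the rewrite author's own statement) =====
-- stated objective: faster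
-- what changed: B counts divisors in paired form only up to sqrt(n) (adding 2 per proper divisor pair, 1 for an exact square root) instead of trial-dividing by every i in range(2, n).
import Mathlib
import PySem

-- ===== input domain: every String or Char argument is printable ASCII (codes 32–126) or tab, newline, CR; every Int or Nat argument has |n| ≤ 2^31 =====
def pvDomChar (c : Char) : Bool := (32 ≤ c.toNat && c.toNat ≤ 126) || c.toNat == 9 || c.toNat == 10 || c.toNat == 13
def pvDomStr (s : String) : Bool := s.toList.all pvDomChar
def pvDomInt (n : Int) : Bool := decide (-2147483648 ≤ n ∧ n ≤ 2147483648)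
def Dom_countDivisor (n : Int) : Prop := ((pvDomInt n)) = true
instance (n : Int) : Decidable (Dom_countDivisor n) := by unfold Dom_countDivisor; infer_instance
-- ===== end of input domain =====

-- B changes the algorithm: it counts divisors in pairs only up to the square root of n
-- instead of trial-dividing by every i in range(2, n) (objective: faster).

-- ===== PORT A =====
def countDivisor (n : Int) : Bool :=
  if n == 1 then false
  else
    let account : Int :=
      (PySem.List.pyRange 2 n 1).foldl
        (fun account i => if PySem.Int.mod n i == 0 then account + 1 else account) 2
    PySem.Int.mod account 2 == 0

-- ===== PORT B =====
-- the `while i * i <= n` loop of Source B; `fuel` is only a totality guard (the loop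
-- starting at i = 2 runs fewer than n.toNat times, see cdAltGo_parity below)
def cdAltGo (n : Int) : Nat → Int → Int → Int
  | 0, _, cnt => cnt
  | fuel + 1, i, cnt =>
    if i * i ≤ n then
      cdAltGo n fuel (i + 1)
        (if PySem.Int.mod n i == 0 then (if i * i == n then cnt + 1 else cnt + 2) else cnt)
    else cnt

def countDivisor_alt (n : Int) : Bool :=
  if n == 1 then false
  else PySem.Int.mod (cdAltGo n n.toNat 2 2) 2 == 0

-- ===== PRECONDITION & SPEC =====
def Spec_countDivisor (n : Int) (out : Bool) : Prop := out = countDivisor_alt n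
instance (n : Int) (out : Bool) : Decidable (Spec_countDivisor n out) := by unfold Spec_countDivisor; infer_instance

-- ===== CLAIM (what is proved, stated in full; the proofs are below) =====
def Claim_equal_countDivisor : Prop := ∀ (n : Int), Dom_countDivisor n → Spec_countDivisor n (countDivisor n)

-- ===== LEMMAS AND PROOFS =====

-- the set of non-trivial divisors of m that A's loop counts
def cdS (m : ℕ) : Finset ℕ := (Finset.Ico 2 m).filter (· ∣ m)

-- a counting fold is init + countP
lemma cd_foldl_count (p : Int → Bool) (l : List Int) (c : Int) :
    l.foldl (fun acc i => if p i then acc + 1 else acc) c = c + l.countP p := by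
  induction l generalizing c with
  | nil => simp
  | cons x xs ih =>
      simp only [List.foldl_cons, List.countP_cons, ih]
      by_cases h : p x
      · simp [h]; ring
      · simp [h]

lemma cd_countP_range (q : ℕ → Prop) [DecidablePred q] (k : ℕ) :
    (List.range k).countP (fun j => decide (q j)) = ((Finset.range k).filter q).card := by
  induction k with
  | zero => simp
  | succ k ih =>
      rw [List.range_succ, List.countP_append, Finset.range_add_one,
        Finset.filter_insert]
      by_cases h : q k <;>
        simp [h, ih, Finset.card_insert_of_notMem]

-- A's count over range(2, n) equals |cdS m| for n = ↑m
lemma cd_account (m : ℕ) (hm : 2 ≤ m) :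
    (PySem.List.pyRange 2 (m : Int) 1).countP (fun i => PySem.Int.mod (m : Int) i == 0)
      = (cdS m).card := by
  rw [PySem.List.pyRange_one, List.countP_map]
  have hpt : ∀ j ∈ List.range ((m : Int) - 2).toNat,
      (((fun i => PySem.Int.mod (m : Int) i == 0) ∘ fun k : ℕ => 2 + (k : Int)) j = true
        ↔ (fun j : ℕ => decide ((2 + j) ∣ m)) j = true) := by
    intro j _
    have h2 : (2 : Int) + (j : Int) = ((2 + j : ℕ) : Int) := by push_cast; ring
    simp only [Function.comp_apply, beq_iff_eq, decide_eq_true_iff, h2,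
      PySem.Int.mod_eq_zero_iff_dvd]
    exact Int.natCast_dvd_natCast
  rw [List.countP_congr hpt, cd_countP_range (fun j => (2 + j) ∣ m)]
  have ht : ((m : Int) - 2).toNat = m - 2 := by omega
  rw [ht]
  apply Finset.card_bij (fun j _ => 2 + j)
  · intro j hj
    simp only [Finset.mem_filter, Finset.mem_range] at hj
    simp only [cdS, Finset.mem_filter, Finset.mem_Ico]
    exact ⟨⟨by omega, by omega⟩, hj.2⟩
  · intro a _ b _ hab; omega
  · intro d hd
    simp only [cdS, Finset.mem_filter, Finset.mem_Ico] at hd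
    refine ⟨d - 2, ?_, by omega⟩
    simp only [Finset.mem_filter, Finset.mem_range]
    constructor
    · omega
    · have h2d : 2 + (d - 2) = d := by omega
      rw [h2d]; exact hd.2

-- parity of |cdS m|: even iff m is not a square of some r ≥ 2
lemma cd_parity (m : ℕ) (hm : 2 ≤ m) :
    Even (cdS m).card ↔ ¬ ∃ r : ℕ, 2 ≤ r ∧ r * r = m := by
  classical
  have hm0 : m ≠ 0 := by omega
  set T := (cdS m).filter (fun d => d * d = m) with hT
  set U := (cdS m).filter (fun d => ¬ d * d = m) with hU
  have hcard : T.card + U.card = (cdS m).card :=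
    Finset.card_filter_add_card_filter_not (s := cdS m) (p := fun d => d * d = m)
  have hmemS : ∀ d, d ∈ cdS m ↔ 2 ≤ d ∧ d < m ∧ d ∣ m := by
    intro d; simp [cdS, Finset.mem_filter, Finset.mem_Ico, and_assoc]
  have hmemU : ∀ d, d ∈ U ↔ (2 ≤ d ∧ d < m ∧ d ∣ m) ∧ ¬ d * d = m := by
    intro d; rw [hU, Finset.mem_filter, hmemS]
  -- facts about a member of U and its partner m / d
  have hUfacts : ∀ a ∈ U, (m / a) * a = m ∧ 2 ≤ m / a ∧ m / a < m ∧ m / a ∣ m ∧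
      ¬ (m / a) * (m / a) = m ∧ m / a ≠ a := by
    intro a ha
    rw [hmemU] at ha
    obtain ⟨⟨ha2, ham, hdvd⟩, hne⟩ := ha
    have h1 : (m / a) * a = m := Nat.div_mul_cancel hdvd
    have hne' : m / a ≠ a := by
      intro hgd; rw [hgd] at h1; exact hne h1
    have h2 : 2 ≤ m / a := by
      by_contra hc
      have hc' : m / a < 2 := Nat.lt_of_not_le hc
      generalize hq : m / a = q at hc' h1
      interval_cases q <;> omega
    have h3 : m / a < m := Nat.div_lt_self (by omega) (by omega)
    have h4 : m / a ∣ m := ⟨a, h1.symm⟩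
    have h5 : ¬ (m / a) * (m / a) = m := by
      intro hsq
      have hmm : (m / a) * (m / a) = (m / a) * a := by rw [hsq, h1]
      have hpos : 0 < m / a := by omega
      exact hne' (Nat.eq_of_mul_eq_mul_left hpos hmm)
    exact ⟨h1, h2, h3, h4, h5, hne'⟩
  -- U pairs off under d ↦ m / d
  have hUeven : Even U.card := by
    have hsum : ∑ _x ∈ U, (1 : ZMod 2) = 0 := by
      apply Finset.sum_involution (g := fun d _ => m / d)
      · intro a _; decide
      · intro a ha _
        exact (hUfacts a ha).2.2.2.2.2
      · intro a ha
        obtain ⟨h1, h2, h3, h4, h5, _⟩ := hUfacts a ha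
        rw [hmemU]
        exact ⟨⟨h2, h3, h4⟩, h5⟩
      · intro a ha
        rw [hmemU] at ha
        exact Nat.div_div_self ha.1.2.2 hm0
    have hz : ((U.card : ℕ) : ZMod 2) = 0 := by
      rw [← hsum, Finset.sum_const, nsmul_eq_mul, mul_one]
    exact ZMod.natCast_eq_zero_iff_even.mp hz
  -- T is the set of square roots ≥ 2, of size 0 or 1
  obtain ⟨k, hk⟩ := hUeven
  by_cases hex : ∃ r : ℕ, 2 ≤ r ∧ r * r = m
  · obtain ⟨r, hr2, hrm⟩ := hex
    have hrlt : r < m := by nlinarith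
    have hT1 : T = {r} := by
      ext d
      simp only [hT, Finset.mem_filter, hmemS, Finset.mem_singleton]
      constructor
      · rintro ⟨_, hdd⟩
        exact Nat.mul_self_inj.mp (by rw [hdd, hrm])
      · intro hdr
        rw [hdr]
        exact ⟨⟨hr2, hrlt, ⟨r, hrm.symm⟩⟩, hrm⟩
    have hSc : (cdS m).card = 1 + (k + k) := by
      rw [← hcard, hT1, Finset.card_singleton]; omega
    have hodd : ¬ Even ((cdS m).card) := by
      rw [hSc]; rintro ⟨t, ht⟩; omega
    exact iff_of_false hodd (by simp only [not_not]; exact ⟨r, hr2, hrm⟩)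
  · have hT0 : T = ∅ := by
      ext d
      simp only [hT, Finset.mem_filter, hmemS, Finset.notMem_empty, iff_false]
      rintro ⟨⟨hd2, _, _⟩, hdd⟩
      exact hex ⟨d, hd2, hdd⟩
    have : (cdS m).card = k + k := by
      rw [← hcard, hT0, Finset.card_empty]; omega
    rw [this]
    simp only [hex, not_false_eq_true, iff_true]
    exact ⟨k, rfl⟩

-- B's loop parity invariant: with enough fuel the loop's result is even iff the
-- initial parity, flipped exactly when n has a square root ≥ i
lemma cdAltGo_parity (n : Int) : ∀ (fuel : Nat) (i c : Int), 2 ≤ i → n + 2 - i ≤ fuel →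
    (Even (cdAltGo n fuel i c) ↔ (Even c ↔ ¬ ∃ r : Int, i ≤ r ∧ r * r = n)) := by
  intro fuel
  induction fuel with
  | zero =>
      intro i c hi hf
      have hno : ¬ ∃ r : Int, i ≤ r ∧ r * r = n := by
        rintro ⟨r, hr, hrn⟩
        have hrr : r ≤ r * r := le_mul_of_one_le_left (by omega) (by omega)
        simp only [Nat.cast_zero] at hf
        omega
      simp [cdAltGo, hno]
  | succ fuel ih =>
      intro i c hi hf
      rw [cdAltGo]
      by_cases h : i * i ≤ n
      case neg =>
        rw [if_neg h]
        have hno : ¬ ∃ r : Int, i ≤ r ∧ r * r = n := by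
          rintro ⟨r, hr, hrn⟩
          have : n < r * r := by nlinarith
          omega
        simp [hno]
      rw [if_pos h]
      rw [ih (i + 1) _ (by omega) (by push_cast at hf ⊢; omega)]
      by_cases hsq : i * i = n
      · have hd : PySem.Int.mod n i = 0 :=
          (PySem.Int.mod_eq_zero_iff_dvd n i).mpr ⟨i, hsq.symm⟩
        have hnone : ¬ ∃ r : Int, i + 1 ≤ r ∧ r * r = n := by
          rintro ⟨r, hr, hrn⟩; nlinarith
        have hsome : ∃ r : Int, i ≤ r ∧ r * r = n := ⟨i, le_refl i, hsq⟩
        simp only [hd, hsq, beq_self_eq_true, if_true, hnone, not_false_eq_true,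
          iff_true, hsome, not_true_eq_false, iff_false, Int.even_add_one]
      · have hiff : (∃ r : Int, i + 1 ≤ r ∧ r * r = n) ↔ (∃ r : Int, i ≤ r ∧ r * r = n) := by
          constructor
          · rintro ⟨r, hr, hrn⟩; exact ⟨r, by omega, hrn⟩
          · rintro ⟨r, hr, hrn⟩
            refine ⟨r, ?_, hrn⟩
            rcases eq_or_lt_of_le hr with rfl | hlt
            · exact absurd hrn hsq
            · omega
        have heven : ∀ c' : Int, Even (c' + 2) ↔ Even c' := by
          intro c'; simp only [Int.even_iff]; omega
        have hbn : ¬ (i * i == n) = true := by simp [hsq]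
        by_cases hd : (PySem.Int.mod n i == 0) = true
        · rw [if_pos hd, if_neg hbn, heven, hiff]
        · rw [if_neg hd, hiff]

-- ===== VERDICT (by name: the statement is the Claim_ definition above) =====
theorem countDivisor_spec : Claim_equal_countDivisor := by
  intro n _
  unfold Spec_countDivisor
  by_cases h1 : n = 1
  · simp [countDivisor, countDivisor_alt, h1]
  by_cases hgt : 2 ≤ n
  case neg =>
    -- n ≤ 0 : both loops are empty, both return True
    have hr : PySem.List.pyRange 2 n 1 = [] := PySem.List.pyRange_one_eq_nil (by omega)
    have hloop : cdAltGo n n.toNat 2 2 = 2 := by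
      have h0 : n.toNat = 0 := by omega
      rw [h0, cdAltGo]
    have hne : (n == 1) = false := by simp [h1]
    simp only [countDivisor, countDivisor_alt, hne, Bool.false_eq_true, if_false, hr,
      List.foldl_nil, hloop]
  case pos =>
    -- n ≥ 2
    have hm2 : 2 ≤ n.toNat := by omega
    have hcast : ((n.toNat : Int)) = n := by omega
    have hcnt : (PySem.List.pyRange 2 n 1).countP (fun i => PySem.Int.mod n i == 0)
        = (cdS n.toNat).card := by
      rw [← hcast, Int.toNat_natCast]
      exact cd_account n.toNat hm2
    have hA : countDivisor n
        = (PySem.Int.mod (2 + ((cdS n.toNat).card : Int)) 2 == 0) := by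
      rw [countDivisor, if_neg (by simp [h1])]
      rw [cd_foldl_count (fun i => PySem.Int.mod n i == 0), hcnt]
    have hB : countDivisor_alt n = (PySem.Int.mod (cdAltGo n n.toNat 2 2) 2 == 0) := by
      rw [countDivisor_alt, if_neg (by simp [h1])]
    rw [hA, hB, Bool.eq_iff_iff]
    have h2d : ∀ x : Int, 2 ∣ x ↔ Even x :=
      fun x => ⟨fun ⟨k, hk⟩ => ⟨k, by omega⟩, fun ⟨k, hk⟩ => ⟨k, by omega⟩⟩
    simp only [beq_iff_eq, PySem.Int.mod_eq_zero_iff_dvd, h2d]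
    have hbr : (∃ r : Int, 2 ≤ r ∧ r * r = n) ↔ (∃ r : ℕ, 2 ≤ r ∧ r * r = n.toNat) := by
      constructor
      · rintro ⟨r, hr2, hrn⟩
        refine ⟨r.toNat, by omega, ?_⟩
        have hr' : ((r.toNat : Int)) = r := by omega
        have : ((r.toNat * r.toNat : ℕ) : Int) = ((n.toNat : ℕ) : Int) := by
          push_cast
          rw [hr', hrn, hcast]
        exact_mod_cast this
      · rintro ⟨r, hr2, hrm⟩
        refine ⟨(r : Int), by exact_mod_cast hr2, ?_⟩
        rw [← hcast]
        exact_mod_cast hrm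
    have hAiff : Even (2 + ((cdS n.toNat).card : Int)) ↔ Even (cdS n.toNat).card := by
      rw [Int.even_add]
      simp [Int.even_coe_nat]
    rw [hAiff, cdAltGo_parity n n.toNat 2 2 (le_refl 2) (by omega), cd_parity n.toNat hm2, hbr]
    simp
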